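-- pv_equiv track=rewrite | github.com/nickchengtw/cv-candlestick-pattern-detector | utils/pattern.py | find_valley_peak_pattern
-- ===== SOURCE A (Python) =====
-- def find_valley_peak_pattern(peaks, valleys, peak_tolerance=10):
--     data = list(
--         sorted(
--             list(zip(peaks, ["peak"] * len(peaks)))
--             + list(zip(valleys, ["valley"] * len(valleys))),
--             key=lambda x: x[0][0],
--         )
--     )
--
--     patterns = []
--     n = len(data)
--
--     i = 0
--     while i < n - 4:
--         # Extract consecutive groups of 5 dots
--         dot1, dot2, dot3, dot4, dot5 = data[i : i + 5]
--
--         # Check for valley-peak-valley-peak-valley pattern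
--         if (
--             # dot1[1] == "valley" and
--             dot2[1] == "peak"
--             and dot3[1] == "valley"
--             and dot4[1] == "peak"
--             # and dot5[1] == "valley"
--         ):
--             y1, y2, y3, y4, y5 = (
--                 dot1[0][1],
--                 dot2[0][1],
--                 dot3[0][1],
--                 dot4[0][1],
--                 dot5[0][1],
--             )
--
--             # Check if the two peaks have approximately the same y-coordinate
--             if abs(y2 - y4) <= peak_tolerance:
--                 # Check if the first and last valleys are lower than the middle valley
--                 if y1 > y3 - peak_tolerance and y5 > y3 - peak_tolerance:
--                     patterns.append((dot1, dot2, dot3, dot4, dot5))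
--                     # Skip to the next group after the current pattern
--                     i += 5
--                     continue
--
--         # Move to the next dot
--         i += 1
--
--     return patterns
-- ===== SOURCE B (Python) =====
-- def _matches(win, tol):
--     d1, d2, d3, d4, d5 = win
--     return (d2[1] == "peak" and d3[1] == "valley" and d4[1] == "peak"
--             and abs(d2[0][1] - d4[0][1]) <= tol
--             and d1[0][1] > d3[0][1] - tol and d5[0][1] > d3[0][1] - tol)
--
--
-- def find_valley_peak_pattern(peaks, valleys, peak_tolerance=10):
--     data = sorted([(p, "peak") for p in peaks] + [(v, "valley") for v in valleys],
--                   key=lambda x: x[0][0])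
--     n = len(data)
--     # pass 1: table of every candidate window start
--     candidates = [(i, tuple(data[i:i + 5]))
--                   for i in range(n - 4)
--                   if _matches(tuple(data[i:i + 5]), peak_tolerance)]
--     # pass 2: greedy left-to-right selection of non-overlapping windows
--     patterns = []
--     next_allowed = 0
--     for i, win in candidates:
--         if i >= next_allowed:
--             patterns.append(win)
--             next_allowed = i + 5
--     return patterns
-- ===== Notes on version B (the rewrite author's own statement) =====
-- stated objective: alternative
-- what changed: A's single interleaved while-loop (advance by 5 after a hit, by 1 otherwise) is replaced by two separate passes: build a table of all candidate window starts that satisfy the pattern predicate, then greedily select non-overlapping windows from it with a next_allowed cursor.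
import Mathlib
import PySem

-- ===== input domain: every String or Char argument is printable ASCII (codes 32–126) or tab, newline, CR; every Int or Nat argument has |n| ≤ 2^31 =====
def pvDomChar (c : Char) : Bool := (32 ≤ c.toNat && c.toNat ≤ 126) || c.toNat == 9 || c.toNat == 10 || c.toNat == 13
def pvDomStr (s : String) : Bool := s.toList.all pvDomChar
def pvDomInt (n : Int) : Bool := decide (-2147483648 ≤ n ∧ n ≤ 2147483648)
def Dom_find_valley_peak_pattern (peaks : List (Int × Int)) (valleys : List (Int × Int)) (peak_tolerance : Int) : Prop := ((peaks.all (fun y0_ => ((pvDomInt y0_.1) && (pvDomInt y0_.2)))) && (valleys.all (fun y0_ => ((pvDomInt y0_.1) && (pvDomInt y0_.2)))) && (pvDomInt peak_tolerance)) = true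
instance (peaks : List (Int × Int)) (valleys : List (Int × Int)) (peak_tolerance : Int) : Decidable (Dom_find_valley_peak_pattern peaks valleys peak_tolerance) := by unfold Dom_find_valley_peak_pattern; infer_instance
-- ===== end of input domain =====

-- B replaces A's interleaved while-loop (i += 5 on a hit, i += 1 otherwise) by two passes:
-- a candidate table of all matching window starts, then a greedy non-overlapping selection sweep
-- (objective: alternative decomposition; same asymptotic cost).

abbrev pvDot : Type := (Int × Int) × String
abbrev pvPat : Type := pvDot × pvDot × pvDot × pvDot × pvDot

-- ===== PORT A =====
-- the while-loop of A: checks the window at i, takes it and jumps to i+5, or moves to i+1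
def pvLoopA (data : List pvDot) (tol : Int) (i : Nat) : List pvPat :=
  if _h : i + 4 < data.length then   -- while i < n - 4
    match PySem.List.slice data (some (i : Int)) (some ((i + 5 : Nat) : Int)) with
    | [d1, d2, d3, d4, d5] =>
      if d2.2 = "peak" ∧ d3.2 = "valley" ∧ d4.2 = "peak" then
        if |d2.1.2 - d4.1.2| ≤ tol then
          if d1.1.2 > d3.1.2 - tol ∧ d5.1.2 > d3.1.2 - tol then
            (d1, d2, d3, d4, d5) :: pvLoopA data tol (i + 5)
          else pvLoopA data tol (i + 1)
        else pvLoopA data tol (i + 1)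
      else pvLoopA data tol (i + 1)
    | _ => []   -- unreachable: data[i:i+5] has exactly 5 elements when i < n - 4
  else []
termination_by data.length - i
decreasing_by all_goals omega

def find_valley_peak_pattern (peaks : List (Int × Int)) (valleys : List (Int × Int)) (peak_tolerance : Int) : List (((Int × Int) × String) × ((Int × Int) × String) × ((Int × Int) × String) × ((Int × Int) × String) × ((Int × Int) × String)) :=
  let data := PySem.List.sorted
    (peaks.zip (List.replicate peaks.length "peak") ++ valleys.zip (List.replicate valleys.length "valley"))
    (fun x => x.1.1) false
  pvLoopA data peak_tolerance 0

-- ===== PORT B =====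
-- _matches(win, tol) of Source B
def pvMatches : pvPat → Int → Bool
  | (d1, d2, d3, d4, d5), tol =>
    d2.2 == "peak" && d3.2 == "valley" && d4.2 == "peak" &&
    decide (|d2.1.2 - d4.1.2| ≤ tol) &&
    decide (d1.1.2 > d3.1.2 - tol) && decide (d5.1.2 > d3.1.2 - tol)

-- tuple(data[i:i+5]) of Source B, unpacked into a 5-tuple (none = fewer than 5 elements)
def pvWin? (data : List pvDot) (i : Nat) : Option pvPat :=
  match PySem.List.slice data (some (i : Int)) (some ((i + 5 : Nat) : Int)) with
  | [d1, d2, d3, d4, d5] => some (d1, d2, d3, d4, d5)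
  | _ => none

def find_valley_peak_pattern_alt (peaks : List (Int × Int)) (valleys : List (Int × Int)) (peak_tolerance : Int) : List (((Int × Int) × String) × ((Int × Int) × String) × ((Int × Int) × String) × ((Int × Int) × String) × ((Int × Int) × String)) :=
  let data := PySem.List.sorted
    (peaks.map (fun p => (p, "peak")) ++ valleys.map (fun v => (v, "valley")))
    (fun x => x.1.1) false
  let n := data.length
  -- pass 1: candidate table
  let candidates : List (Nat × pvPat) :=
    (List.range (n - 4)).filterMap (fun i =>
      match pvWin? data i with
      | some w => if pvMatches w peak_tolerance then some (i, w) else none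
      | none => none)
  -- pass 2: greedy sweep with a next_allowed cursor
  (candidates.foldl
    (fun st c => if st.1 ≤ c.1 then (c.1 + 5, st.2 ++ [c.2]) else st)
    ((0 : Nat), ([] : List pvPat))).2

-- ===== PRECONDITION & SPEC =====
def Spec_find_valley_peak_pattern (peaks : List (Int × Int)) (valleys : List (Int × Int)) (peak_tolerance : Int) (out : List (((Int × Int) × String) × ((Int × Int) × String) × ((Int × Int) × String) × ((Int × Int) × String) × ((Int × Int) × String))) : Prop := out = find_valley_peak_pattern_alt peaks valleys peak_tolerance
instance (peaks : List (Int × Int)) (valleys : List (Int × Int)) (peak_tolerance : Int) (out : List (((Int × Int) × String) × ((Int × Int) × String) × ((Int × Int) × String) × ((Int × Int) × String) × ((Int × Int) × String))) : Decidable (Spec_find_valley_peak_pattern peaks valleys peak_tolerance out) := by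
  unfold Spec_find_valley_peak_pattern
  -- built by hand: instance search on the 5-fold product is too slow
  have h1 : DecidableEq pvDot := instDecidableEqProd
  have h5 : DecidableEq pvPat :=
    @instDecidableEqProd _ _ h1 (@instDecidableEqProd _ _ h1 (@instDecidableEqProd _ _ h1 (@instDecidableEqProd _ _ h1 h1)))
  exact @instDecidableEqList _ h5 _ _

-- ===== CLAIM (what is proved, stated in full; the proofs are below) =====
def Claim_equal_find_valley_peak_pattern : Prop := ∀ (peaks : List (Int × Int)) (valleys : List (Int × Int)) (peak_tolerance : Int), Dom_find_valley_peak_pattern peaks valleys peak_tolerance → Spec_find_valley_peak_pattern peaks valleys peak_tolerance (find_valley_peak_pattern peaks valleys peak_tolerance)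

-- ===== LEMMAS AND PROOFS =====

lemma pvZip_replicate (xs : List (Int × Int)) (s : String) :
    xs.zip (List.replicate xs.length s) = xs.map (fun p => (p, s)) := by
  induction xs with
  | nil => rfl
  | cons x t ih => simp [List.replicate_succ, ih]

lemma pvSlice5 (data : List pvDot) (i : Nat) (h : i + 4 < data.length) :
    ∃ d1 d2 d3 d4 d5, PySem.List.slice data (some (i : Int)) (some ((i + 5 : Nat) : Int)) = [d1, d2, d3, d4, d5] := by
  rw [PySem.List.slice_natCast]
  have h5 : i + 5 - i = 5 := by omega
  rw [h5]
  have hl : ((data.drop i).take 5).length = 5 := by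
    simp [List.length_take, List.length_drop]; omega
  rcases hl5 : (data.drop i).take 5 with _ | ⟨a, _ | ⟨b, _ | ⟨c, _ | ⟨d, _ | ⟨e, t⟩⟩⟩⟩⟩ <;>
    rw [hl5] at hl <;> simp at hl
  exact ⟨a, b, c, d, e, by rw [hl]⟩

lemma pvLoopA_stop (data : List pvDot) (tol : Int) (i : Nat) (h : ¬ i + 4 < data.length) :
    pvLoopA data tol i = [] := by
  rw [pvLoopA]; simp [h]

lemma pvLoopA_take (data : List pvDot) (tol : Int) (i : Nat) (d1 d2 d3 d4 d5 : pvDot)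
    (h : i + 4 < data.length)
    (hs : PySem.List.slice data (some (i : Int)) (some ((i + 5 : Nat) : Int)) = [d1, d2, d3, d4, d5])
    (hm : pvMatches (d1, d2, d3, d4, d5) tol = true) :
    pvLoopA data tol i = (d1, d2, d3, d4, d5) :: pvLoopA data tol (i + 5) := by
  simp only [pvMatches, Bool.and_eq_true, beq_iff_eq, decide_eq_true_eq] at hm
  rw [pvLoopA]
  simp only [h, dite_true, hs]
  rw [if_pos ⟨hm.1.1.1.1.1, hm.1.1.1.1.2, hm.1.1.1.2⟩, if_pos hm.1.1.2, if_pos ⟨hm.1.2, hm.2⟩]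

lemma pvLoopA_skip (data : List pvDot) (tol : Int) (i : Nat) (d1 d2 d3 d4 d5 : pvDot)
    (h : i + 4 < data.length)
    (hs : PySem.List.slice data (some (i : Int)) (some ((i + 5 : Nat) : Int)) = [d1, d2, d3, d4, d5])
    (hm : pvMatches (d1, d2, d3, d4, d5) tol = false) :
    pvLoopA data tol i = pvLoopA data tol (i + 1) := by
  simp only [pvMatches, Bool.and_eq_false_iff, beq_eq_false_iff_ne, ne_eq, decide_eq_false_iff_not] at hm
  rw [pvLoopA]
  simp only [h, dite_true, hs]
  split_ifs with h1 h2 h3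
  · exfalso; tauto
  · rfl
  · rfl
  · rfl

-- the heart: the greedy sweep over the candidate suffix starting at s, with cursor na,
-- computes exactly A's loop restarted at max s na
lemma pvSel (data : List pvDot) (tol : Int) :
    ∀ (len s na : Nat) (acc : List pvPat), s + len = data.length - 4 →
    (((List.range' s len).filterMap (fun i =>
        match pvWin? data i with
        | some w => if pvMatches w tol then some (i, w) else none
        | none => none)).foldl
      (fun st c => if st.1 ≤ c.1 then (c.1 + 5, st.2 ++ [c.2]) else st) (na, acc)).2
      = acc ++ pvLoopA data tol (max s na) := by
  intro len
  induction len with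
  | zero =>
    intro s na acc hs
    simp only [List.range', List.filterMap_nil, List.foldl_nil]
    rw [pvLoopA_stop data tol _ (by omega)]
    simp
  | succ len ih =>
    intro s na acc hs
    have hlt : s + 4 < data.length := by omega
    obtain ⟨d1, d2, d3, d4, d5, hsl⟩ := pvSlice5 data s hlt
    have hw : pvWin? data s = some (d1, d2, d3, d4, d5) := by
      unfold pvWin?; rw [hsl]
    rw [List.range'_succ]
    by_cases hm : pvMatches (d1, d2, d3, d4, d5) tol = true
    · rw [List.filterMap_cons, hw]
      simp only [hm, if_true, List.foldl_cons]
      by_cases hna : na ≤ s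
      · rw [if_pos (show na ≤ s from hna)]
        rw [ih (s + 1) (s + 5) (acc ++ [(d1, d2, d3, d4, d5)]) (by omega)]
        have hmax : max (s + 1) (s + 5) = s + 5 := by omega
        rw [hmax, Nat.max_eq_left hna,
          pvLoopA_take data tol s d1 d2 d3 d4 d5 hlt hsl hm]
        simp
      · rw [if_neg (show ¬ na ≤ s from hna)]
        rw [ih (s + 1) na acc (by omega)]
        have h1 : max (s + 1) na = na := by omega
        have h2 : max s na = na := by omega
        rw [h1, h2]
    · rw [List.filterMap_cons, hw]
      rw [Bool.not_eq_true] at hm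
      simp only [hm, Bool.false_eq_true, if_false]
      rw [ih (s + 1) na acc (by omega)]
      by_cases hna : na ≤ s
      · have h1 : max (s + 1) na = s + 1 := by omega
        have h2 : max s na = s := by omega
        rw [h1, h2,
          pvLoopA_skip data tol s d1 d2 d3 d4 d5 hlt hsl hm]
      · have h1 : max (s + 1) na = na := by omega
        have h2 : max s na = na := by omega
        rw [h1, h2]

lemma pvMain (data : List pvDot) (tol : Int) :
    pvLoopA data tol 0 =
      (((List.range (data.length - 4)).filterMap (fun i =>
          match pvWin? data i with
          | some w => if pvMatches w tol then some (i, w) else none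
          | none => none)).foldl
        (fun st c => if st.1 ≤ c.1 then (c.1 + 5, st.2 ++ [c.2]) else st)
        ((0 : Nat), ([] : List pvPat))).2 := by
  rw [List.range_eq_range', pvSel data tol (data.length - 4) 0 0 [] (by omega)]
  simp

-- ===== VERDICT (by name: the statement is the Claim_ definition above) =====
theorem find_valley_peak_pattern_spec : Claim_equal_find_valley_peak_pattern := by
  intro peaks valleys tol _
  unfold Spec_find_valley_peak_pattern find_valley_peak_pattern find_valley_peak_pattern_alt
  rw [pvZip_replicate peaks "peak", pvZip_replicate valleys "valley"]
  exact pvMain _ tol
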